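-- pv_equiv track=rewrite | github.com/eltonsarmanho/FasiTech | src/services/form_service.py | _find_email_by_name
-- ===== SOURCE A (Python) =====
-- import unicodedata
--
-- def _normalize_person_name(value: str) -> str:
--     normalized = unicodedata.normalize("NFKD", value)
--     ascii_only = normalized.encode("ascii", "ignore").decode("ascii")
--     return " ".join(ascii_only.casefold().split())
--
-- def _find_email_by_name(name: str, name_email_map: dict[str, str]) -> str | None:
--     if name in name_email_map:
--         return name_email_map[name]
--
--     normalized_name = _normalize_person_name(name)
--     for mapped_name, email in name_email_map.items():
--         if _normalize_person_name(mapped_name) == normalized_name: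
--             return email
--     return None
-- ===== SOURCE B (Python) =====
-- import unicodedata
--
-- def _normalize_person_name(value: str) -> str:
--     normalized = unicodedata.normalize("NFKD", value)
--     ascii_only = normalized.encode("ascii", "ignore").decode("ascii")
--     return " ".join(ascii_only.casefold().split())
--
-- def _find_email_by_name(name: str, name_email_map: dict[str, str]) -> str | None:
--     if name in name_email_map:
--         return name_email_map[name]
--
--     normalized_name = _normalize_person_name(name)
--     index: dict[str, str] = {}
--     for mapped_name, email in name_email_map.items():
--         index.setdefault(_normalize_person_name(mapped_name), email)
--     return index.get(normalized_name)
-- ===== Notes on version B (the rewrite author's own statement) =====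
-- stated objective: alternative
-- what changed: Replaces A's early-exit scan comparing each normalized key against the query with building a first-occurrence normalized-key->email index via setdefault and a single dict lookup.
import Mathlib
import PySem

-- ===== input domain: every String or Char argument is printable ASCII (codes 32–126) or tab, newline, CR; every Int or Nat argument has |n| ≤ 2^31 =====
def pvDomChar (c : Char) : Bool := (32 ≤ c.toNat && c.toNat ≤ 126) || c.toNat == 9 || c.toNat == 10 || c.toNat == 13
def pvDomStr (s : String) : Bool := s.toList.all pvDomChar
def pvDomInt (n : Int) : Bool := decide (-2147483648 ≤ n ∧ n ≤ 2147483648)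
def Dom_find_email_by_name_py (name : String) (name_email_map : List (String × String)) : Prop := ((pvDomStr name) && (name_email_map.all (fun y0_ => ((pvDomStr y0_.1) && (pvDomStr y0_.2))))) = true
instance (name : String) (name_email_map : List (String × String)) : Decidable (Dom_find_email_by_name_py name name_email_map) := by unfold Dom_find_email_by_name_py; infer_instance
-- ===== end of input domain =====

-- B builds a first-occurrence normalized-key index with setdefault and does one lookup,
-- instead of A's early-exit scan comparing each normalized key with the query (alternative decomposition).

-- ===== PORT A =====
-- _normalize_person_name: on the printable-ASCII domain NFKD and the ascii-ignore round trip are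
-- the identity and casefold coincides with lower, so this is exact on Dom.
def pvNorm (s : String) : String := PySem.Str.join " " (PySem.Str.split₀ (PySem.Str.lower s))

-- the for-loop of A: first email whose normalized key equals q, early exit
def pvScanA (q : String) : List (String × String) → Option String
  | [] => none
  | (k, v) :: rest => if pvNorm k = q then some v else pvScanA q rest

def find_email_by_name_py (name : String) (name_email_map : List (String × String)) : Option String :=
  let d := PySem.Dict.ofList name_email_map   -- the dict[str,str] argument
  match d.get? name with
  | some e => some e
  | none => pvScanA (pvNorm name) d.items

-- ===== PORT B =====
def find_email_by_name_py_alt (name : String) (name_email_map : List (String × String)) : Option String :=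
  let d := PySem.Dict.ofList name_email_map   -- the dict[str,str] argument
  match d.get? name with
  | some e => some e
  | none =>
    let q := pvNorm name
    let index := d.items.foldl
      (fun (ix : PySem.Dict String String) kv => ix.setdefault (pvNorm kv.1) kv.2)
      PySem.Dict.empty
    index.get? q

-- ===== PRECONDITION & SPEC =====
def Spec_find_email_by_name_py (name : String) (name_email_map : List (String × String)) (out : Option String) : Prop := out = find_email_by_name_py_alt name name_email_map
instance (name : String) (name_email_map : List (String × String)) (out : Option String) : Decidable (Spec_find_email_by_name_py name name_email_map out) := by unfold Spec_find_email_by_name_py; infer_instance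

-- ===== CLAIM (what is proved, stated in full; the proofs are below) =====
def Claim_equal_find_email_by_name_py : Prop := ∀ (name : String) (name_email_map : List (String × String)), Dom_find_email_by_name_py name name_email_map → Spec_find_email_by_name_py name name_email_map (find_email_by_name_py name name_email_map)

-- ===== LEMMAS AND PROOFS =====

-- the setdefault index, looked up at q, yields ix's binding for q if any, else the first scan hit
theorem pv_index_get (q : String) :
    ∀ (xs : List (String × String)) (ix : PySem.Dict String String),
      (xs.foldl (fun (ix : PySem.Dict String String) kv => ix.setdefault (pvNorm kv.1) kv.2) ix).get? q
        = match ix.get? q with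
          | some v => some v
          | none => pvScanA q xs := by
  intro xs
  induction xs with
  | nil => intro ix; cases h : ix.get? q <;> simp [pvScanA] <;> exact h
  | cons kv rest ih =>
    intro ix
    obtain ⟨k, v⟩ := kv
    simp only [List.foldl_cons]
    rw [ih]
    by_cases hc : ix.contains (pvNorm k) = true
    · rw [PySem.Dict.setdefault_of_contains _ _ hc]
      cases h : ix.get? q with
      | some w => simp
      | none =>
        simp only [pvScanA]
        have hne : ¬ pvNorm k = q := by
          intro he
          rw [PySem.Dict.contains_eq_isSome_get?, he, h] at hc
          simp at hc
        simp [hne]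
    · rw [PySem.Dict.setdefault_of_not_contains _ _ (by simpa using hc)]
      by_cases he : q = pvNorm k
      · subst he
        rw [PySem.Dict.get?_insert_self]
        have h0 : ix.get? (pvNorm k) = none := by
          rw [PySem.Dict.get?_eq_none_iff_contains]; simpa using hc
        simp [h0, pvScanA]
      · rw [PySem.Dict.get?_insert_of_ne _ _ he]
        cases h : ix.get? q with
        | some w => simp
        | none =>
          simp only [pvScanA]
          rw [if_neg (fun hkq => he hkq.symm)]

-- ===== VERDICT (by name: the statement is the Claim_ definition above) =====
theorem find_email_by_name_py_spec : Claim_equal_find_email_by_name_py := by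
  intro name name_email_map _
  unfold Spec_find_email_by_name_py find_email_by_name_py find_email_by_name_py_alt
  cases h : (PySem.Dict.ofList name_email_map).get? name with
  | some e => simp [h]
  | none => simp [h, pv_index_get]
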